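-- pv_equiv track=rewrite | github.com/solvmanifold/LatentTrader | src/trading_advisor/models/dataset.py | _format_feature_list
-- ===== SOURCE A (Python) =====
-- from typing import List, Dict, Optional, Tuple, Callable
--
-- def _format_feature_list(features: List[str]) -> str:
--     """Format a list of features for the README."""
--     if not features:
--         return "No features specified in configuration."
--
--     # Categorize features
--     ticker_features = []
--     market_features = {
--         "daily_breadth": [],
--         "market_volatility": [],
--         "market_sentiment": []
--     }
--     sector_features = []
--
--     # Categorize features based on their suffixes and names
--     for feature in features:
--         if '_daily_breadth' in feature:
--             market_features["daily_breadth"].append(feature)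
--         elif '_market_volatility' in feature:
--             market_features["market_volatility"].append(feature)
--         elif '_market_sentiment' in feature:
--             market_features["market_sentiment"].append(feature)
--         elif feature.endswith('_sector'):
--             sector_features.append(feature)
--         else:
--             ticker_features.append(feature)
--
--     # Format the features
--     formatted = []
--
--     if ticker_features:
--         formatted.append("### Ticker Features")
--         formatted.extend([f"- `{feature}`" for feature in sorted(ticker_features)])
--
--     if any(market_features.values()):
--         formatted.append("\n### Market Features")
--         for category, features in market_features.items():
--             if features:
--                 formatted.append(f"#### {category.replace('_', ' ').title()}")
--                 formatted.extend([f"- `{feature}`" for feature in sorted(features)])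
--
--     if sector_features:
--         formatted.append("\n### Sector Features")
--         formatted.extend([f"- `{feature}`" for feature in sorted(sector_features)])
--
--     return "\n".join(formatted)
-- ===== SOURCE B (Python) =====
-- _MARKET_TITLES = ("Daily Breadth", "Market Volatility", "Market Sentiment")
--
--
-- def _rank(feature):
--     """Emission rank: ticker 0, market sub-categories 1-3, sector 4 (elif priority kept)."""
--     if '_daily_breadth' in feature:
--         return 1
--     if '_market_volatility' in feature:
--         return 2
--     if '_market_sentiment' in feature:
--         return 3
--     if feature.endswith('_sector'):
--         return 4
--     return 0
--
--
-- def _headers(prev, rank):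
--     """Header lines to emit when a run with a new rank starts."""
--     if rank == 0:
--         return ["### Ticker Features"]
--     if rank == 4:
--         return ["\n### Sector Features"]
--     head = ["\n### Market Features"] if prev < 1 else []
--     return head + ["#### " + _MARKET_TITLES[rank - 1]]
--
--
-- def _format_feature_list(features):
--     """Format a list of features for the README."""
--     if not features:
--         return "No features specified in configuration."
--
--     # One schedule sort (stable: alphabetical, then by emission rank), then a single
--     # grouped emission pass that inserts headers at run boundaries -- no buckets at all.
--     lines = []
--     prev = -1
--     for feature in sorted(sorted(features), key=_rank):
--         r = _rank(feature)
--         if r != prev: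
--             lines.extend(_headers(prev, r))
--             prev = r
--         lines.append(f"- `{feature}`")
--     return "\n".join(lines)
-- ===== Notes on version B (the rewrite author's own statement) =====
-- stated objective: alternative
-- what changed: B replaces A's five category buckets and staged section formatting by a schedule sort (stable sort of the alphabetically sorted input by an emission rank 0-4) followed by one grouped emission pass that inserts section/subsection headers at rank run boundaries; no bucket lists, no per-bucket sorted(), no runtime replace/title.
import Mathlib
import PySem

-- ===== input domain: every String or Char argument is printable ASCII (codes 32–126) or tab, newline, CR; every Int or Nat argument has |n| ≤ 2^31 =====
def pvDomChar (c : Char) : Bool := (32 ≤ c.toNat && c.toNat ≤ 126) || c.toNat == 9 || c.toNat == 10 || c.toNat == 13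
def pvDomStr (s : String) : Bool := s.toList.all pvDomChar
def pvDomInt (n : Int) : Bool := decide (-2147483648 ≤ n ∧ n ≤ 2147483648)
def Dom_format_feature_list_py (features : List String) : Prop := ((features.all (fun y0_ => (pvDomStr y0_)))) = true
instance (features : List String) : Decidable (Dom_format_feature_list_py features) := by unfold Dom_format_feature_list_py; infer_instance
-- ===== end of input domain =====

-- B replaces A's five category buckets and staged sections by a schedule sort (stable sort of
-- the alphabetically sorted input by an emission rank) plus one grouped emission pass that
-- inserts headers at rank run boundaries (objective: alternative algorithm, same cost).

-- ===== PORT A =====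

-- f"- `{feature}`"
def pvLine (f : String) : String := String.ofList ('-' :: ' ' :: '`' :: (f.toList ++ ['`']))

-- string concatenation a + b (kernel-transparent)
def pvCat (a b : String) : String := String.ofList (a.toList ++ b.toList)

-- hand port of str.title(): uppercase a cased char not preceded by a cased char, lowercase
-- otherwise; exact on the ASCII domain, where 'cased' = isAlpha.
def pvTitleGo : Bool → List Char → List Char
  | _, [] => []
  | prevCased, c :: cs =>
    if c.isAlpha then (if prevCased then c.toLower else c.toUpper) :: pvTitleGo true cs
    else c :: pvTitleGo false cs

def pvTitle (s : String) : String := String.ofList (pvTitleGo false s.toList)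

-- the body of A's categorization for-loop (state: ticker, market dict, sector)
def pvStepA (st : List String × PySem.Dict String (List String) × List String) (feature : String) :
    List String × PySem.Dict String (List String) × List String :=
  let (t, m, s) := st
  if PySem.Str.isIn "_daily_breadth" feature then
    (t, m.modify "daily_breadth" [] (fun l => l ++ [feature]), s)
  else if PySem.Str.isIn "_market_volatility" feature then
    (t, m.modify "market_volatility" [] (fun l => l ++ [feature]), s)
  else if PySem.Str.isIn "_market_sentiment" feature then
    (t, m.modify "market_sentiment" [] (fun l => l ++ [feature]), s)
  else if PySem.Str.endswith feature "_sector" then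
    (t, m, s ++ [feature])
  else
    (t ++ [feature], m, s)

def format_feature_list_py (features : List String) : String :=
  if features.isEmpty then "No features specified in configuration."
  else
    let st := features.foldl pvStepA
      ([], PySem.Dict.ofList [("daily_breadth", []), ("market_volatility", []), ("market_sentiment", [])], [])
    let ticker := st.1
    let market := st.2.1
    let sector := st.2.2
    let formatted₁ :=
      if !ticker.isEmpty then
        ["### Ticker Features"] ++ (PySem.List.sorted ticker (fun x => x) false).map pvLine
      else []
    let formatted₂ :=
      if market.values.any (fun v => !v.isEmpty) then
        market.items.foldl (fun acc kv =>
          if !kv.2.isEmpty then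
            acc ++ [pvCat "#### " (pvTitle (PySem.Str.replace kv.1 "_" " "))]
              ++ (PySem.List.sorted kv.2 (fun x => x) false).map pvLine
          else acc)
          (formatted₁ ++ ["\n### Market Features"])
      else formatted₁
    let formatted₃ :=
      if !sector.isEmpty then
        formatted₂ ++ ["\n### Sector Features"] ++ (PySem.List.sorted sector (fun x => x) false).map pvLine
      else formatted₂
    PySem.Str.join "\n" formatted₃

-- ===== PORT B =====

-- emission rank: ticker 0, market sub-categories 1-3, sector 4 (elif priority kept)
def pvRank (feature : String) : Int :=
  if PySem.Str.isIn "_daily_breadth" feature then 1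
  else if PySem.Str.isIn "_market_volatility" feature then 2
  else if PySem.Str.isIn "_market_sentiment" feature then 3
  else if PySem.Str.endswith feature "_sector" then 4
  else 0

-- header lines emitted when a run with a new rank starts
def pvHeaders (prev rank : Int) : List String :=
  if rank = 0 then ["### Ticker Features"]
  else if rank = 4 then ["\n### Sector Features"]
  else (if prev < 1 then ["\n### Market Features"] else []) ++
    [pvCat "#### " (PySem.List.pyGetD ["Daily Breadth", "Market Volatility", "Market Sentiment"] (rank - 1) "")]

-- the body of B's single emission for-loop (state: lines, prev)
def pvEmit (st : List String × Int) (feature : String) : List String × Int :=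
  let r := pvRank feature
  if r ≠ st.2 then (st.1 ++ pvHeaders st.2 r ++ [pvLine feature], r)
  else (st.1 ++ [pvLine feature], st.2)

def format_feature_list_py_alt (features : List String) : String :=
  if features.isEmpty then "No features specified in configuration."
  else
    let st :=
      (PySem.List.sorted (PySem.List.sorted features (fun x => x) false) pvRank false).foldl
        pvEmit ([], -1)
    PySem.Str.join "\n" st.1

-- ===== PRECONDITION & SPEC =====
def Spec_format_feature_list_py (features : List String) (out : String) : Prop := out = format_feature_list_py_alt features
instance (features : List String) (out : String) : Decidable (Spec_format_feature_list_py features out) := by unfold Spec_format_feature_list_py; infer_instance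

-- ===== CLAIM (what is proved, stated in full; the proofs are below) =====
def Claim_equal_format_feature_list_py : Prop := ∀ (features : List String), Dom_format_feature_list_py features → Spec_format_feature_list_py features (format_feature_list_py features)

-- ===== LEMMAS AND PROOFS =====

-- the rank-membership predicates (Bool), i.e. the elif-chain filters
def pvQ (i : Int) (f : String) : Bool := pvRank f == i

-- A's categorization loop puts exactly the elif-chain filters into the three containers
theorem loopA (xs : List String) : ∀ (t d v s sec : List String),
    xs.foldl pvStepA (t, PySem.Dict.mk [("daily_breadth", d), ("market_volatility", v), ("market_sentiment", s)], sec)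
    = (t ++ xs.filter (pvQ 0),
       PySem.Dict.mk [("daily_breadth", d ++ xs.filter (pvQ 1)), ("market_volatility", v ++ xs.filter (pvQ 2)), ("market_sentiment", s ++ xs.filter (pvQ 3))],
       sec ++ xs.filter (pvQ 4)) := by
  induction xs with
  | nil => intro t d v s sec; simp
  | cons f xs ih =>
    intro t d v s sec
    simp only [List.foldl_cons, pvStepA, List.filter_cons]
    by_cases h1 : PySem.Str.isIn "_daily_breadth" f <;>
      by_cases h2 : PySem.Str.isIn "_market_volatility" f <;>
        by_cases h3 : PySem.Str.isIn "_market_sentiment" f <;>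
          by_cases h4 : PySem.Str.endswith f "_sector" <;>
            simp at h1 h2 h3 h4 <;>
            simp [h1, h2, h3, h4, pvQ, pvRank,
              PySem.Dict.modify, PySem.Dict.insert, PySem.Dict.getD, PySem.Dict.get?,
              PySem.Dict.contains] <;>
            rw [ih] <;> simp

-- pvRank only takes the values 0..4
theorem pvRank_cases (f : String) :
    pvRank f = 0 ∨ pvRank f = 1 ∨ pvRank f = 2 ∨ pvRank f = 3 ∨ pvRank f = 4 := by
  unfold pvRank; split_ifs <;> simp

-- insertBy walks past a prefix it is not inserted into
theorem insertBy_skip {α : Type} (before : α → α → Bool) (x : α) (l1 l2 : List α)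
    (h : ∀ y ∈ l1, before x y = false) :
    PySem.List.insertBy before x (l1 ++ l2) = l1 ++ PySem.List.insertBy before x l2 := by
  induction l1 with
  | nil => simp
  | cons y ys ih =>
    simp only [List.cons_append, PySem.List.insertBy]
    rw [h y (by simp)]
    simp [ih (fun z hz => h z (by simp [hz]))]

-- insertBy puts x in front when it goes before every element
theorem insertBy_front {α : Type} (before : α → α → Bool) (x : α) (l : List α)
    (h : ∀ y ∈ l, before x y = true) :
    PySem.List.insertBy before x l = x :: l := by
  cases l with
  | nil => simp [PySem.List.insertBy]
  | cons y ys => simp [PySem.List.insertBy, h y (by simp)]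

-- the stable sort by pvRank is the concatenation of the five rank filters, in rank order
theorem sorted_rank (xs : List String) :
    PySem.List.sorted xs pvRank false =
      xs.filter (pvQ 0) ++ xs.filter (pvQ 1) ++ xs.filter (pvQ 2) ++ xs.filter (pvQ 3) ++ xs.filter (pvQ 4) := by
  induction xs using List.reverseRecOn with
  | nil => rfl
  | append_singleton xs x ih =>
    have hstep : PySem.List.sorted (xs ++ [x]) pvRank false
        = PySem.List.insertBy (fun a b => decide (pvRank a < pvRank b)) x (PySem.List.sorted xs pvRank false) := by
      rw [PySem.List.sorted_eq_foldl_insertBy, PySem.List.sorted_eq_foldl_insertBy, List.foldl_append]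
      rfl
    have hq : ∀ (i : Int), ∀ y ∈ xs.filter (pvQ i), pvRank y = i := by
      intro i y hy
      have := List.of_mem_filter hy
      simpa [pvQ] using this
    rw [hstep, ih]
    simp only [List.filter_append, List.filter_cons, List.filter_nil]
    rcases pvRank_cases x with h | h | h | h | h
    · -- pvRank x = 0
      rw [show (xs.filter (pvQ 0)) ++ (xs.filter (pvQ 1)) ++ (xs.filter (pvQ 2)) ++ (xs.filter (pvQ 3)) ++ (xs.filter (pvQ 4))
            = (xs.filter (pvQ 0)) ++ ((xs.filter (pvQ 1)) ++ ((xs.filter (pvQ 2)) ++ ((xs.filter (pvQ 3)) ++ (xs.filter (pvQ 4))))) from by simp]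
      rw [insertBy_skip _ x (xs.filter (pvQ 0)) ((xs.filter (pvQ 1)) ++ ((xs.filter (pvQ 2)) ++ ((xs.filter (pvQ 3)) ++ (xs.filter (pvQ 4))))) (by
        intro y hy
        all_goals first
          | (have := hq 0 y hy; simp [this, h]))]
      rw [insertBy_front _ x ((xs.filter (pvQ 1)) ++ ((xs.filter (pvQ 2)) ++ ((xs.filter (pvQ 3)) ++ (xs.filter (pvQ 4))))) (by
        intro y hy
        simp only [List.mem_append] at hy
        rcases hy with hy | hy | hy | hy
        all_goals first
          | (have := hq 1 y hy; simp [this, h])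
          | (have := hq 2 y hy; simp [this, h])
          | (have := hq 3 y hy; simp [this, h])
          | (have := hq 4 y hy; simp [this, h]))]
      simp [pvQ, h]
    · -- pvRank x = 1
      rw [show (xs.filter (pvQ 0)) ++ (xs.filter (pvQ 1)) ++ (xs.filter (pvQ 2)) ++ (xs.filter (pvQ 3)) ++ (xs.filter (pvQ 4))
            = ((xs.filter (pvQ 0)) ++ (xs.filter (pvQ 1))) ++ ((xs.filter (pvQ 2)) ++ ((xs.filter (pvQ 3)) ++ (xs.filter (pvQ 4)))) from by simp]
      rw [insertBy_skip _ x ((xs.filter (pvQ 0)) ++ (xs.filter (pvQ 1))) ((xs.filter (pvQ 2)) ++ ((xs.filter (pvQ 3)) ++ (xs.filter (pvQ 4)))) (by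
        intro y hy
        simp only [List.mem_append] at hy
        rcases hy with hy | hy
        all_goals first
          | (have := hq 0 y hy; simp [this, h])
          | (have := hq 1 y hy; simp [this, h]))]
      rw [insertBy_front _ x ((xs.filter (pvQ 2)) ++ ((xs.filter (pvQ 3)) ++ (xs.filter (pvQ 4)))) (by
        intro y hy
        simp only [List.mem_append] at hy
        rcases hy with hy | hy | hy
        all_goals first
          | (have := hq 2 y hy; simp [this, h])
          | (have := hq 3 y hy; simp [this, h])
          | (have := hq 4 y hy; simp [this, h]))]
      simp [pvQ, h]
    · -- pvRank x = 2
      rw [show (xs.filter (pvQ 0)) ++ (xs.filter (pvQ 1)) ++ (xs.filter (pvQ 2)) ++ (xs.filter (pvQ 3)) ++ (xs.filter (pvQ 4))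
            = ((xs.filter (pvQ 0)) ++ ((xs.filter (pvQ 1)) ++ (xs.filter (pvQ 2)))) ++ ((xs.filter (pvQ 3)) ++ (xs.filter (pvQ 4))) from by simp]
      rw [insertBy_skip _ x ((xs.filter (pvQ 0)) ++ ((xs.filter (pvQ 1)) ++ (xs.filter (pvQ 2)))) ((xs.filter (pvQ 3)) ++ (xs.filter (pvQ 4))) (by
        intro y hy
        simp only [List.mem_append] at hy
        rcases hy with hy | hy | hy
        all_goals first
          | (have := hq 0 y hy; simp [this, h])
          | (have := hq 1 y hy; simp [this, h])
          | (have := hq 2 y hy; simp [this, h]))]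
      rw [insertBy_front _ x ((xs.filter (pvQ 3)) ++ (xs.filter (pvQ 4))) (by
        intro y hy
        simp only [List.mem_append] at hy
        rcases hy with hy | hy
        all_goals first
          | (have := hq 3 y hy; simp [this, h])
          | (have := hq 4 y hy; simp [this, h]))]
      simp [pvQ, h]
    · -- pvRank x = 3
      rw [show (xs.filter (pvQ 0)) ++ (xs.filter (pvQ 1)) ++ (xs.filter (pvQ 2)) ++ (xs.filter (pvQ 3)) ++ (xs.filter (pvQ 4))
            = ((xs.filter (pvQ 0)) ++ ((xs.filter (pvQ 1)) ++ ((xs.filter (pvQ 2)) ++ (xs.filter (pvQ 3))))) ++ (xs.filter (pvQ 4)) from by simp]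
      rw [insertBy_skip _ x ((xs.filter (pvQ 0)) ++ ((xs.filter (pvQ 1)) ++ ((xs.filter (pvQ 2)) ++ (xs.filter (pvQ 3))))) (xs.filter (pvQ 4)) (by
        intro y hy
        simp only [List.mem_append] at hy
        rcases hy with hy | hy | hy | hy
        all_goals first
          | (have := hq 0 y hy; simp [this, h])
          | (have := hq 1 y hy; simp [this, h])
          | (have := hq 2 y hy; simp [this, h])
          | (have := hq 3 y hy; simp [this, h]))]
      rw [insertBy_front _ x (xs.filter (pvQ 4)) (by
        intro y hy
        all_goals first
          | (have := hq 4 y hy; simp [this, h]))]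
      simp [pvQ, h]
    · -- pvRank x = 4
      rw [show (xs.filter (pvQ 0)) ++ (xs.filter (pvQ 1)) ++ (xs.filter (pvQ 2)) ++ (xs.filter (pvQ 3)) ++ (xs.filter (pvQ 4))
            = ((xs.filter (pvQ 0)) ++ ((xs.filter (pvQ 1)) ++ ((xs.filter (pvQ 2)) ++ ((xs.filter (pvQ 3)) ++ (xs.filter (pvQ 4)))))) from by simp]
      rw [PySem.List.insertBy_of_forall_not_before _ x ((xs.filter (pvQ 0)) ++ ((xs.filter (pvQ 1)) ++ ((xs.filter (pvQ 2)) ++ ((xs.filter (pvQ 3)) ++ (xs.filter (pvQ 4)))))) (by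
        intro y hy
        simp only [List.mem_append] at hy
        rcases hy with hy | hy | hy | hy | hy
        all_goals first
          | (have := hq 0 y hy; simp [this, h])
          | (have := hq 1 y hy; simp [this, h])
          | (have := hq 2 y hy; simp [this, h])
          | (have := hq 3 y hy; simp [this, h])
          | (have := hq 4 y hy; simp [this, h]))]
      simp [pvQ, h]

-- stable sort by the identity key commutes with filtering
theorem sorted_filter_comm (p : String → Bool) (xs : List String) :
    PySem.List.sorted (xs.filter p) (fun x => x) false
    = (PySem.List.sorted xs (fun x => x) false).filter p := by
  exact PySem.List.sorted_id_eq_of_perm_of_pairwise _ _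
    ((PySem.List.sorted_perm xs (fun x => x) false).filter p)
    (List.Pairwise.sublist List.filter_sublist (PySem.List.sorted_pairwise xs (fun x => x)))

-- the emission loop over a run of constant rank r, starting at prev = r: lines only
theorem emit_run (r : Int) (xs : List String) (h : ∀ f ∈ xs, pvRank f = r) (acc : List String) :
    xs.foldl pvEmit (acc, r) = (acc ++ xs.map pvLine, r) := by
  induction xs generalizing acc with
  | nil => simp
  | cons f fs ih =>
    have hf : pvRank f = r := h f (by simp)
    have hstep : (f :: fs).foldl pvEmit (acc, r) = fs.foldl pvEmit (acc ++ [pvLine f], r) := by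
      simp [pvEmit, hf]
    rw [hstep, ih (fun g hg => h g (by simp [hg])) _]
    simp

-- the emission loop over one whole (possibly empty) run of rank r entered at prev = p ≠ r
theorem emit_block (r p : Int) (xs : List String) (h : ∀ f ∈ xs, pvRank f = r) (hp : p ≠ r)
    (acc : List String) :
    xs.foldl pvEmit (acc, p)
      = (acc ++ (if xs.isEmpty then [] else pvHeaders p r ++ xs.map pvLine),
         if xs.isEmpty then p else r) := by
  cases xs with
  | nil => simp
  | cons f fs =>
    have hf : pvRank f = r := h f (by simp)
    have hp' : ¬ (r = p) := fun e => hp e.symm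
    have hstep : (f :: fs).foldl pvEmit (acc, p) = fs.foldl pvEmit (acc ++ pvHeaders p r ++ [pvLine f], r) := by
      simp [pvEmit, hf, hp']
    rw [hstep, emit_run r fs (fun g hg => h g (by simp [hg]))]
    simp

theorem pvH_m1_0 : pvHeaders (-1) 0 = ["### Ticker Features"] := by decide
theorem pvH_m1_1 : pvHeaders (-1) 1 = ["\n### Market Features", "#### Daily Breadth"] := by decide
theorem pvH_0_1 : pvHeaders (0) 1 = ["\n### Market Features", "#### Daily Breadth"] := by decide
theorem pvH_m1_2 : pvHeaders (-1) 2 = ["\n### Market Features", "#### Market Volatility"] := by decide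
theorem pvH_0_2 : pvHeaders (0) 2 = ["\n### Market Features", "#### Market Volatility"] := by decide
theorem pvH_1_2 : pvHeaders (1) 2 = ["#### Market Volatility"] := by decide
theorem pvH_m1_3 : pvHeaders (-1) 3 = ["\n### Market Features", "#### Market Sentiment"] := by decide
theorem pvH_0_3 : pvHeaders (0) 3 = ["\n### Market Features", "#### Market Sentiment"] := by decide
theorem pvH_1_3 : pvHeaders (1) 3 = ["#### Market Sentiment"] := by decide
theorem pvH_2_3 : pvHeaders (2) 3 = ["#### Market Sentiment"] := by decide
theorem pvH_m1_4 : pvHeaders (-1) 4 = ["\n### Sector Features"] := by decide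
theorem pvH_0_4 : pvHeaders (0) 4 = ["\n### Sector Features"] := by decide
theorem pvH_1_4 : pvHeaders (1) 4 = ["\n### Sector Features"] := by decide
theorem pvH_2_4 : pvHeaders (2) 4 = ["\n### Sector Features"] := by decide
theorem pvH_3_4 : pvHeaders (3) 4 = ["\n### Sector Features"] := by decide

-- the whole emission pass over the five rank runs, in closed form
theorem emit_all (S0 S1 S2 S3 S4 : List String)
    (h0 : ∀ f ∈ S0, pvRank f = 0) (h1 : ∀ f ∈ S1, pvRank f = 1) (h2 : ∀ f ∈ S2, pvRank f = 2)
    (h3 : ∀ f ∈ S3, pvRank f = 3) (h4 : ∀ f ∈ S4, pvRank f = 4) :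
    ((S0 ++ S1 ++ S2 ++ S3 ++ S4).foldl pvEmit ([], -1)).1 =
      (if S0.isEmpty then [] else "### Ticker Features" :: S0.map pvLine)
      ++ (if S1.isEmpty then [] else ["\n### Market Features", "#### Daily Breadth"] ++ S1.map pvLine)
      ++ (if S2.isEmpty then [] else (if S1.isEmpty then ["\n### Market Features"] else []) ++ ["#### Market Volatility"] ++ S2.map pvLine)
      ++ (if S3.isEmpty then [] else (if S1.isEmpty ∧ S2.isEmpty then ["\n### Market Features"] else []) ++ ["#### Market Sentiment"] ++ S3.map pvLine)
      ++ (if S4.isEmpty then [] else "\n### Sector Features" :: S4.map pvLine) := by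
  rw [List.foldl_append, List.foldl_append, List.foldl_append, List.foldl_append]
  rw [emit_block 0 (-1) S0 h0 (by decide) []]
  rw [emit_block 1 _ S1 h1 (by split_ifs <;> decide) _]
  rw [emit_block 2 _ S2 h2 (by split_ifs <;> decide) _]
  rw [emit_block 3 _ S3 h3 (by split_ifs <;> decide) _]
  rw [emit_block 4 _ S4 h4 (by split_ifs <;> decide) _]
  by_cases e0 : S0.isEmpty <;> by_cases e1 : S1.isEmpty <;> by_cases e2 : S2.isEmpty <;>
    by_cases e3 : S3.isEmpty <;> by_cases e4 : S4.isEmpty <;>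
      simp [e0, e1, e2, e3, e4, pvH_m1_0, pvH_m1_1, pvH_0_1, pvH_m1_2, pvH_0_2, pvH_1_2, pvH_m1_3, pvH_0_3, pvH_1_3, pvH_2_3, pvH_m1_4, pvH_0_4, pvH_1_4, pvH_2_4, pvH_3_4]

theorem pvTitleDB : pvCat "#### " (pvTitle (PySem.Str.replace "daily_breadth" "_" " ")) = "#### Daily Breadth" := by decide
theorem pvTitleMV : pvCat "#### " (pvTitle (PySem.Str.replace "market_volatility" "_" " ")) = "#### Market Volatility" := by decide
theorem pvTitleMS : pvCat "#### " (pvTitle (PySem.Str.replace "market_sentiment" "_" " ")) = "#### Market Sentiment" := by decide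



theorem isEmpty_filter_sorted (p : String → Bool) (xs : List String) :
    ((PySem.List.sorted xs (fun x => x) false).filter p).isEmpty = (xs.filter p).isEmpty := by
  rw [← sorted_filter_comm, Bool.eq_iff_iff]
  simp [List.isEmpty_iff, PySem.List.sorted_eq_nil_iff]

-- ===== VERDICT (by name: the statement is the Claim_ definition above) =====
set_option maxHeartbeats 4000000 in
theorem format_feature_list_py_spec : Claim_equal_format_feature_list_py := by
  intro features _
  unfold Spec_format_feature_list_py format_feature_list_py format_feature_list_py_alt
  by_cases he : features.isEmpty
  · simp [he]
  · simp only [he, Bool.false_eq_true, if_false]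
    rw [show (PySem.Dict.ofList [("daily_breadth", ([]:List String)), ("market_volatility", []), ("market_sentiment", [])]) = PySem.Dict.mk [("daily_breadth", []), ("market_volatility", []), ("market_sentiment", [])] from rfl]
    rw [loopA]
    rw [sorted_rank]
    rw [emit_all _ _ _ _ _
      (fun f hf => by simpa [pvQ] using List.of_mem_filter hf)
      (fun f hf => by simpa [pvQ] using List.of_mem_filter hf)
      (fun f hf => by simpa [pvQ] using List.of_mem_filter hf)
      (fun f hf => by simpa [pvQ] using List.of_mem_filter hf)
      (fun f hf => by simpa [pvQ] using List.of_mem_filter hf)]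
    simp only [List.nil_append]
    simp only [PySem.Dict.values, List.map_cons, List.map_nil,
      List.any_cons, List.any_nil, List.foldl_cons, List.foldl_nil]
    simp only [pvTitleDB, pvTitleMV, pvTitleMS]
    simp only [sorted_filter_comm, isEmpty_filter_sorted]
    by_cases b0 : (features.filter (pvQ 0)).isEmpty <;>
      by_cases b1 : (features.filter (pvQ 1)).isEmpty <;>
        by_cases b2 : (features.filter (pvQ 2)).isEmpty <;>
          by_cases b3 : (features.filter (pvQ 3)).isEmpty <;>
            by_cases b4 : (features.filter (pvQ 4)).isEmpty <;>
              simp [b0, b1, b2, b3, b4]
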